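-- pv_equiv track=rewrite | github.com/gaboza12/we-are-algorithm | 724thomas/Week7 DynamicProgramming1/17175.py | solution
-- ===== SOURCE A (Python) =====
-- def solution(n):
--     if n <= 1:
--         return 1
--     if n == 2:
--         return 3
--     dp = [0] * (n+1)
--     dp[1] = 1
--     dp[2] = 3
--
--     for i in range(3, n+1):
--         dp[i] = 1 + dp[i-1] + dp[i-2]
--     return dp[n] % 1000000007
-- ===== SOURCE B (Python) =====
-- M = 1000000007
--
--
-- def _fib_pair(k):
--     # (F(k) % M, F(k+1) % M) by fast doubling.
--     if k == 0:
--         return (0, 1)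
--     a, b = _fib_pair(k // 2)
--     c = (a * ((2 * b - a) % M)) % M
--     d = (a * a + b * b) % M
--     if k % 2 == 0:
--         return (c, d)
--     return (d, (c + d) % M)
--
--
-- def solution(n):
--     if n <= 1:
--         return 1
--     if n == 2:
--         return 3
--     f, _ = _fib_pair(n + 1)
--     return (2 * f - 1) % M
-- ===== Notes on version B (the rewrite author's own statement) =====
-- stated objective: faster
-- what changed: Replaced the O(n) dp-array recurrence with closed-form 2*F(n+1)-1 computed by fast-doubling Fibonacci mod 1e9+7.
import Mathlib
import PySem

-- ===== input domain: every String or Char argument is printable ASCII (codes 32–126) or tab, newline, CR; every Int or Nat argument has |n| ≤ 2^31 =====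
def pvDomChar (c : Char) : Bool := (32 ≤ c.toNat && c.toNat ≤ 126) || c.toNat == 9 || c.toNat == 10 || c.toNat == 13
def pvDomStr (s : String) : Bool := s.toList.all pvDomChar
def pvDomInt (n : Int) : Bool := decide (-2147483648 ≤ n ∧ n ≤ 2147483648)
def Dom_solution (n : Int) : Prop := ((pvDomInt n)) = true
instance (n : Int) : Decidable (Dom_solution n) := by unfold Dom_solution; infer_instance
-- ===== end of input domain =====

-- B replaces A's O(n) dp-array recurrence by the closed form 2*F(n+1)-1 with fast-doubling Fibonacci mod 1e9+7 (objective: faster).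

-- ===== PORT A =====
-- literal port of A's dp-array loop; all dp indexes are provably in range for n ≥ 3,
-- so the total forms pySetD/pyGetD coincide with Python's dp[i] here
def stepA (dp : List Int) (i : Int) : List Int :=
  PySem.List.pySetD dp i
    (1 + PySem.List.pyGetD dp (i - 1) 0 + PySem.List.pyGetD dp (i - 2) 0)

def solution (n : Int) : Int :=
  if n ≤ 1 then 1
  else if n = 2 then 3
  else
    let dp0 := List.replicate (n + 1).toNat (0 : Int)
    let dp1 := PySem.List.pySetD dp0 1 1
    let dp2 := PySem.List.pySetD dp1 2 3
    let dpF := (PySem.List.pyRange 3 (n + 1) 1).foldl stepA dp2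
    PySem.Int.mod (PySem.List.pyGetD dpF n 0) 1000000007

-- ===== PORT B =====
-- (F(k) % M, F(k+1) % M) by fast doubling, transliterating Source B's _fib_pair
def fibPairM (k : Nat) : Int × Int :=
  if h : k = 0 then (0, 1)
  else
    let p := fibPairM (k / 2)
    let a := p.1
    let b := p.2
    let c := PySem.Int.mod (a * (PySem.Int.mod (2 * b - a) 1000000007)) 1000000007
    let d := PySem.Int.mod (a * a + b * b) 1000000007
    if k % 2 = 0 then (c, d) else (d, PySem.Int.mod (c + d) 1000000007)
decreasing_by exact Nat.div_lt_self (Nat.pos_of_ne_zero h) one_lt_two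

def solution_alt (n : Int) : Int :=
  if n ≤ 1 then 1
  else if n = 2 then 3
  else PySem.Int.mod (2 * (fibPairM (n + 1).toNat).1 - 1) 1000000007

-- ===== PRECONDITION & SPEC =====
def Spec_solution (n : Int) (out : Int) : Prop := out = solution_alt n
instance (n : Int) (out : Int) : Decidable (Spec_solution n out) := by unfold Spec_solution; infer_instance

-- ===== CLAIM (what is proved, stated in full; the proofs are below) =====
def Claim_equal_solution : Prop := ∀ (n : Int), Dom_solution n → Spec_solution n (solution n)

-- ===== LEMMAS AND PROOFS =====

-- the exact dp value: dp[j] = 2*F(j+1) - 1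
def dpVal (j : Nat) : Int := 2 * (Nat.fib (j + 1) : Int) - 1

theorem dpVal_rec (m : Nat) : dpVal (m + 3) = 1 + dpVal (m + 2) + dpVal (m + 1) := by
  simp only [dpVal]
  have h : Nat.fib (m + 4) = Nat.fib (m + 2) + Nat.fib (m + 3) := Nat.fib_add_two
  push_cast [show m + 3 + 1 = m + 4 from rfl, h]
  ring

theorem pvEmodSelf (x : Int) : x % 1000000007 ≡ x [ZMOD 1000000007] :=
  Int.emod_emod_of_dvd x dvd_rfl

theorem pvModC (x y : Int) :
    (x % 1000000007 * ((2 * (y % 1000000007) - x % 1000000007) % 1000000007)) % 1000000007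
      = (x * (2 * y - x)) % 1000000007 :=
  (pvEmodSelf x).mul ((pvEmodSelf _).trans (((Int.ModEq.refl 2).mul (pvEmodSelf y)).sub (pvEmodSelf x)))

theorem pvModD (x y : Int) :
    (x % 1000000007 * (x % 1000000007) + y % 1000000007 * (y % 1000000007)) % 1000000007
      = (x * x + y * y) % 1000000007 :=
  ((pvEmodSelf x).mul (pvEmodSelf x)).add ((pvEmodSelf y).mul (pvEmodSelf y))

theorem pvModSum (x y : Int) :
    (x % 1000000007 + y % 1000000007) % 1000000007 = (x + y) % 1000000007 :=
  (pvEmodSelf x).add (pvEmodSelf y)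

theorem fibPairM_eq (k : Nat) :
    fibPairM k = ((Nat.fib k : Int) % 1000000007, (Nat.fib (k + 1) : Int) % 1000000007) := by
  induction k using Nat.strong_induction_on with
  | _ k ih =>
    rw [fibPairM]
    by_cases h0 : k = 0
    · subst h0; decide
    · simp only [h0, ih (k / 2) (Nat.div_lt_self (Nat.pos_of_ne_zero h0) one_lt_two)]
      have hM : (0 : Int) < 1000000007 := by norm_num
      simp only [PySem.Int.mod_eq_emod_of_pos hM]
      have hle : Nat.fib (k / 2) ≤ 2 * Nat.fib (k / 2 + 1) := by
        have := Nat.fib_le_fib_succ (n := k / 2); omega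
      have hc : ((Nat.fib (k / 2) : Int) % 1000000007 *
            ((2 * ((Nat.fib (k / 2 + 1) : Int) % 1000000007) -
              (Nat.fib (k / 2) : Int) % 1000000007) % 1000000007)) % 1000000007
          = (Nat.fib (2 * (k / 2)) : Int) % 1000000007 := by
        have h2m : (Nat.fib (2 * (k / 2)) : Int)
            = (Nat.fib (k / 2) : Int) * (2 * (Nat.fib (k / 2 + 1) : Int) - (Nat.fib (k / 2) : Int)) := by
          rw [Nat.fib_two_mul]; push_cast [hle]; ring
        rw [h2m, pvModC]
      have hd : ((Nat.fib (k / 2) : Int) % 1000000007 * ((Nat.fib (k / 2) : Int) % 1000000007) +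
            (Nat.fib (k / 2 + 1) : Int) % 1000000007 * ((Nat.fib (k / 2 + 1) : Int) % 1000000007)) % 1000000007
          = (Nat.fib (2 * (k / 2) + 1) : Int) % 1000000007 := by
        have h2m1 : (Nat.fib (2 * (k / 2) + 1) : Int)
            = (Nat.fib (k / 2) : Int) * (Nat.fib (k / 2) : Int) +
              (Nat.fib (k / 2 + 1) : Int) * (Nat.fib (k / 2 + 1) : Int) := by
          rw [Nat.fib_two_mul_add_one]; push_cast; ring
        rw [h2m1, pvModD]
      by_cases hpar : k % 2 = 0
      · have hk : 2 * (k / 2) = k := by omega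
        simp only [hpar, if_true]
        rw [hc, hd, hk]
        simp
      · have hk1 : 2 * (k / 2) + 1 = k := by omega
        simp only [hpar, if_false]
        rw [hc, hd]
        have hsum : ((Nat.fib (2 * (k / 2)) : Int) % 1000000007 +
              (Nat.fib (2 * (k / 2) + 1) : Int) % 1000000007) % 1000000007
            = (Nat.fib (2 * (k / 2) + 2) : Int) % 1000000007 := by
          have hf : (Nat.fib (2 * (k / 2) + 2) : Int)
              = (Nat.fib (2 * (k / 2)) : Int) + (Nat.fib (2 * (k / 2) + 1) : Int) := by
            rw [Nat.fib_add_two]; push_cast; ring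
          rw [hf, pvModSum]
        rw [hsum, hk1]
        have hk2 : 2 * (k / 2) + 2 = k + 1 := by omega
        rw [hk2]
        simp

theorem loopA (N : Nat) (L0 : List Int) (hlen : L0.length = N + 1)
    (h1 : PySem.List.pyGetD L0 ((1 : Nat) : Int) 0 = dpVal 1)
    (h2 : PySem.List.pyGetD L0 ((2 : Nat) : Int) 0 = dpVal 2) :
    ∀ m : Nat, m + 2 ≤ N →
      ((PySem.List.pyRange 3 ((m : Int) + 3) 1).foldl stepA L0).length = N + 1 ∧
      PySem.List.pyGetD ((PySem.List.pyRange 3 ((m : Int) + 3) 1).foldl stepA L0)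
        (((m + 1 : Nat) : Int)) 0 = dpVal (m + 1) ∧
      PySem.List.pyGetD ((PySem.List.pyRange 3 ((m : Int) + 3) 1).foldl stepA L0)
        (((m + 2 : Nat) : Int)) 0 = dpVal (m + 2) := by
  intro m
  induction m with
  | zero =>
    intro _
    rw [show ((0 : Nat) : Int) + 3 = 3 by norm_num, PySem.List.pyRange_one_eq_nil le_rfl]
    simpa using ⟨hlen, h1, h2⟩
  | succ m ihm =>
    intro hm
    obtain ⟨ihlen, ihv1, ihv2⟩ := ihm (by omega)
    have hcast : ((m + 1 : Nat) : Int) + 3 = ((m : Int) + 3) + 1 := by push_cast; ring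
    rw [hcast, PySem.List.pyRange_one_succ_right (by omega), List.foldl_append]
    set L := (PySem.List.pyRange 3 ((m : Int) + 3) 1).foldl stepA L0 with hL
    have hidx : ((m : Int) + 3) = ((m + 3 : Nat) : Int) := by push_cast; ring
    have hsub1 : ((m + 3 : Nat) : Int) - 1 = ((m + 2 : Nat) : Int) := by push_cast; ring
    have hsub2 : ((m + 3 : Nat) : Int) - 2 = ((m + 1 : Nat) : Int) := by push_cast; ring
    have hlt : m + 3 < L.length := by omega
    have hstep : List.foldl stepA L [((m : Int) + 3)]
        = PySem.List.pySetD L ((m + 3 : Nat) : Int) (1 + dpVal (m + 2) + dpVal (m + 1)) := by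
      simp only [List.foldl_cons, List.foldl_nil, stepA, hidx, hsub1, hsub2, ihv1, ihv2]
    rw [hstep]
    refine ⟨by rw [PySem.List.length_pySetD]; exact ihlen, ?_, ?_⟩
    · rw [show (m + 1 + 1 : Nat) = m + 2 from rfl,
        PySem.List.pyGetD_pySetD_natCast L (m + 3) (m + 2) _ 0 hlt, if_neg (by omega)]
      exact ihv2
    · rw [show (m + 1 + 2 : Nat) = m + 3 from rfl,
        PySem.List.pyGetD_pySetD_natCast L (m + 3) (m + 3) _ 0 hlt, if_pos rfl, dpVal_rec]

-- B's final expression agrees with the unreduced closed form mod M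
theorem pvModFinal (f : Int) :
    (2 * (f % 1000000007) - 1) % 1000000007 = (2 * f - 1) % 1000000007 :=
  ((Int.ModEq.refl 2).mul (pvEmodSelf f)).sub (Int.ModEq.refl 1)

-- ===== VERDICT (by name: the statement is the Claim_ definition above) =====
theorem solution_spec : Claim_equal_solution := by
  unfold Claim_equal_solution Spec_solution
  intro n _
  by_cases hle : n ≤ 1
  · simp [solution, solution_alt, hle]
  · by_cases h2 : n = 2
    · simp [solution, solution_alt, h2]
    · have hn3 : 3 ≤ n := by omega
      set N := n.toNat with hN
      have hcN : (N : Int) = n := Int.toNat_of_nonneg (by omega)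
      have hN3 : 3 ≤ N := by omega
      -- initial list facts
      have hrep : (n + 1).toNat = N + 1 := by omega
      set L0 := PySem.List.pySetD (PySem.List.pySetD (List.replicate (N + 1) (0 : Int)) 1 1) 2 3 with hL0
      have hlen : L0.length = N + 1 := by
        simp [hL0, PySem.List.length_pySetD]
      have hv1 : PySem.List.pyGetD L0 ((1 : Nat) : Int) 0 = dpVal 1 := by
        rw [PySem.List.pyGetD_natCast, hL0,
          PySem.List.pySetD_of_nonneg _ _ (by norm_num : (0 : Int) ≤ 2),
          PySem.List.pySetD_of_nonneg _ _ (by norm_num : (0 : Int) ≤ 1)]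
        norm_num
        simp [List.getD_eq_getElem?_getD, List.getElem?_set, List.getElem?_replicate,
          show 1 < N + 1 by omega, dpVal, show Nat.fib 2 = 1 from by decide]
      have hv2 : PySem.List.pyGetD L0 ((2 : Nat) : Int) 0 = dpVal 2 := by
        rw [PySem.List.pyGetD_natCast, hL0,
          PySem.List.pySetD_of_nonneg _ _ (by norm_num : (0 : Int) ≤ 2),
          PySem.List.pySetD_of_nonneg _ _ (by norm_num : (0 : Int) ≤ 1)]
        norm_num
        simp [List.getD_eq_getElem?_getD, List.getElem?_set, List.getElem?_replicate,
          show 2 < N + 1 by omega, dpVal, show Nat.fib 3 = 2 from by decide]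
      have hloop := loopA N L0 hlen hv1 hv2 (N - 2) (by omega)
      have hub : ((N - 2 : Nat) : Int) + 3 = n + 1 := by
        have : ((N - 2 : Nat) : Int) = (N : Int) - 2 := by
          rw [Int.natCast_sub (by omega)]; norm_num
        rw [this, hcN]; ring
      have hix : ((N - 2) + 2 : Nat) = N := by omega
      rw [hub, hix] at hloop
      obtain ⟨-, -, hval⟩ := hloop
      rw [← hcN] at hval
      -- A's value
      have hA : solution n = PySem.Int.mod (dpVal N) 1000000007 := by
        rw [solution]
        simp only [if_neg hle, if_neg h2]
        rw [hrep, ← hL0, ← hcN, hval]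
      -- B's value
      have hB : solution_alt n = PySem.Int.mod (dpVal N) 1000000007 := by
        rw [solution_alt]
        simp only [if_neg hle, if_neg h2]
        rw [hrep, fibPairM_eq]
        have hM : (0 : Int) < 1000000007 := by norm_num
        rw [PySem.Int.mod_eq_emod_of_pos hM, PySem.Int.mod_eq_emod_of_pos hM, dpVal, pvModFinal]
      rw [hA, hB]
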